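-- pv_equiv track=rewrite | github.com/atolat/algorithms-lc | Sorting/lexicographical_order.py | solve
-- ===== SOURCE A (Python) =====
-- from collections import defaultdict, namedtuple
--
-- class Entry:
--     val: str = ''
--     count: int = 0
--
-- def solve(arr):
--     #
--     # Write your code here.
--     #
--     hmap = defaultdict(lambda: Entry())
--
--     op = []
--     for x in arr:
--         key = x.split(' ')[0]
--         value = x.split(' ')[1]
--         if key in hmap:
--             if value > hmap[key].val:
--                 hmap[key].val = value
--                 hmap[key].count += 1
--             else:
--                 hmap[key].count += 1
--         else:
--             hmap[key].val = value
--             hmap[key].count = 1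
--
--     for k, v in hmap.items():
--         op.append(k + ':' + str(v.count) + ',' + v.val)
--
--     return op
-- ===== SOURCE B (Python) =====
-- def solve(arr):
--     groups = {}
--     for x in arr:
--         key = x.split(' ')[0]
--         value = x.split(' ')[1]
--         groups.setdefault(key, []).append(value)
--     return [k + ':' + str(len(vs)) + ',' + max(vs) for k, vs in groups.items()]
-- ===== Notes on version B (the rewrite author's own statement) =====
-- stated objective: alternative
-- what changed: B builds a key -> list-of-values dict in the scanning pass and computes count and max only in the output pass, replacing A's per-row running Entry aggregates (running max comparison and counter) with aggregation over the collected lists.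
import Mathlib
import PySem

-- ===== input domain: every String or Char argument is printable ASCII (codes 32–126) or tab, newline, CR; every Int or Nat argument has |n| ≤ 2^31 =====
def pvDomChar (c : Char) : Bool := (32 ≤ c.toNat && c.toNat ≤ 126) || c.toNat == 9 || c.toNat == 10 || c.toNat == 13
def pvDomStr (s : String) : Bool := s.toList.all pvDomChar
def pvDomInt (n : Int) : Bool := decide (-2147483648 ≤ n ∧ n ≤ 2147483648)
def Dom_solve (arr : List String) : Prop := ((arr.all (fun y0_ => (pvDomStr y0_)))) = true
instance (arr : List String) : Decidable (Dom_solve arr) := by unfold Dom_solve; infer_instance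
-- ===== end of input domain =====

-- B groups the values per key in one pass and computes count/max in the output pass,
-- instead of A's running Entry aggregates (objective: alternative decomposition, same cost).

-- ===== PORT A =====
-- key/value extraction shared shape: x.split(' ')[0] / x.split(' ')[1]
-- (index 1 exists on every input admitted by Pre_solve; outside Pre_ Python raises IndexError)
def pvKey (x : String) : String := (PySem.List.pyGet? ((PySem.Str.split? x " ").getD []) 0).getD ""
def pvVal (x : String) : String := (PySem.List.pyGet? ((PySem.Str.split? x " ").getD []) 1).getD ""

def solve (arr : List String) : List String :=
  let hmap : PySem.Dict String (String × Int) :=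
    arr.foldl (fun h x =>
      let key := pvKey x
      let value := pvVal x
      if h.contains key then
        let e := h.getD key ("", 0)
        if e.1 < value then h.insert key (value, e.2 + 1)
        else h.insert key (e.1, e.2 + 1)
      else
        h.insert key (value, 1)) PySem.Dict.empty
  hmap.items.map (fun p =>
    PySem.Str.join "" [p.1, ":", PySem.Int.toStr p.2.2, ",", p.2.1])

-- ===== PORT B =====
def solve_alt (arr : List String) : List String :=
  let groups : PySem.Dict String (List String) :=
    arr.foldl (fun d x =>
      let key := pvKey x
      let value := pvVal x
      d.modify key [] (· ++ [value])) PySem.Dict.empty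
  groups.items.map (fun p =>
    PySem.Str.join "" [p.1, ":", PySem.Int.toStr (p.2.length : Int), ",",
      (PySem.List.max? p.2 (fun v => v)).getD ""])

-- ===== PRECONDITION & SPEC =====
-- Pre_ excludes exactly the rows with no ' ' (x.split(' ')[1] raises IndexError in A there).
def Pre_solve (arr : List String) : Prop :=
  ∀ x ∈ arr, 2 ≤ ((PySem.Str.split? x " ").getD []).length
instance (arr : List String) : Decidable (Pre_solve arr) := by unfold Pre_solve; infer_instance
def pvWitness_solve : List String := ["a 1", "b 2", "a 3"]

def Spec_solve (arr : List String) (out : List String) : Prop := out = solve_alt arr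
instance (arr : List String) (out : List String) : Decidable (Spec_solve arr out) := by unfold Spec_solve; infer_instance

-- ===== CLAIM (what is proved, stated in full; the proofs are below) =====
def Claim_equal_solve : Prop := ∀ (arr : List String), Dom_solve arr → Pre_solve arr → Spec_solve arr (solve arr)

-- ===== LEMMAS AND PROOFS =====

-- the two loop bodies
def stepA (h : PySem.Dict String (String × Int)) (x : String) : PySem.Dict String (String × Int) :=
  let key := pvKey x
  let value := pvVal x
  if h.contains key then
    let e := h.getD key ("", 0)
    if e.1 < value then h.insert key (value, e.2 + 1)
    else h.insert key (e.1, e.2 + 1)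
  else
    h.insert key (value, 1)

def stepB (d : PySem.Dict String (List String)) (x : String) : PySem.Dict String (List String) :=
  d.modify (pvKey x) [] (· ++ [pvVal x])

-- invariant relating the two dictionaries
def PVInv (dA : PySem.Dict String (String × Int)) (dB : PySem.Dict String (List String)) : Prop :=
  dA.keys = dB.keys ∧ dB.keys.Nodup ∧
  ∀ k ∈ dB.keys, ∃ v t, dB.getD k [] = v :: t ∧
    dA.getD k ("", 0) = (t.foldl max v, ((v :: t).length : Int))

theorem max_eq_if (m v : String) : (if m < v then v else m) = max m v := by
  rcases lt_trichotomy m v with h | h | h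
  · simp [h, max_eq_right h.le]
  · simp [h]
  · simp [not_lt_of_gt h, max_eq_left h.le]

theorem inv_step (dA : PySem.Dict String (String × Int)) (dB : PySem.Dict String (List String))
    (x : String) (h : PVInv dA dB) : PVInv (stepA dA x) (stepB dB x) := by
  obtain ⟨hk, hnd, hrel⟩ := h
  by_cases hc : pvKey x ∈ dB.keys
  · have hcA : dA.contains (pvKey x) = true := by
      rw [PySem.Dict.contains_iff_mem_keys, hk]; exact hc
    have hcB : dB.contains (pvKey x) = true := by
      rw [PySem.Dict.contains_iff_mem_keys]; exact hc
    have hkB : (stepB dB x).keys = dB.keys := by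
      rw [stepB, PySem.Dict.keys_modify, PySem.Dict.keys_insert_of_contains _ _ hcB]
    obtain ⟨v, t, hB, hA⟩ := hrel _ hc
    refine ⟨?_, ?_, ?_⟩
    · rw [hkB]
      simp only [stepA, hcA, if_true]
      split <;> rw [PySem.Dict.keys_insert_of_contains _ _ hcA] <;> exact hk
    · rw [hkB]; exact hnd
    · intro k hkmem
      have hkmem' : k ∈ dB.keys := hkB ▸ hkmem
      by_cases hkk : k = pvKey x
      · subst hkk
        refine ⟨v, t ++ [pvVal x], ?_, ?_⟩
        · simp [stepB, hB]
        · simp only [stepA, hcA, if_true, hA]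
          rw [List.foldl_append]
          simp only [List.foldl]
          rw [← max_eq_if (t.foldl max v) (pvVal x)]
          split <;> simp [PySem.Dict.getD_insert]
      · obtain ⟨v', t', hB', hA'⟩ := hrel k hkmem'
        refine ⟨v', t', ?_, ?_⟩
        · simp [stepB, PySem.Dict.getD_modify, hkk, hB']
        · simp only [stepA, hcA, if_true]
          split <;> simp [PySem.Dict.getD_insert, hkk, hA']
  · have hcA : dA.contains (pvKey x) = false := by
      rw [Bool.eq_false_iff]
      intro hcon
      exact hc (hk ▸ (PySem.Dict.contains_iff_mem_keys _ _).mp hcon)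
    have hcB : dB.contains (pvKey x) = false := by
      rw [Bool.eq_false_iff]
      intro hcon
      exact hc ((PySem.Dict.contains_iff_mem_keys _ _).mp hcon)
    have hkB : (stepB dB x).keys = dB.keys ++ [pvKey x] := by
      rw [stepB, PySem.Dict.keys_modify, PySem.Dict.keys_insert_of_not_contains _ _ hcB]
    have hkA : (stepA dA x).keys = dA.keys ++ [pvKey x] := by
      simp only [stepA, hcA, Bool.false_eq_true, if_false]
      exact PySem.Dict.keys_insert_of_not_contains _ _ hcA
    refine ⟨?_, ?_, ?_⟩
    · rw [hkA, hkB, hk]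
    · rw [hkB]
      exact hnd.append (List.nodup_singleton _)
        (fun a ha hb => hc ((List.mem_singleton.mp hb) ▸ ha))
    · intro k hkmem
      have hmem2 : k ∈ dB.keys ++ [pvKey x] := hkB ▸ hkmem
      by_cases hkk : k = pvKey x
      · subst hkk
        refine ⟨pvVal x, [], ?_, ?_⟩
        · simp [stepB, PySem.Dict.getD_of_not_contains _ _ hcB]
        · simp [stepA, hcA]
      · have hkmem' : k ∈ dB.keys := by
          rcases List.mem_append.mp hmem2 with h' | h'
          · exact h'
          · exact absurd (List.mem_singleton.mp h') hkk
        obtain ⟨v', t', hB', hA'⟩ := hrel k hkmem'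
        refine ⟨v', t', ?_, ?_⟩
        · simp [stepB, PySem.Dict.getD_modify, hkk, hB']
        · simp [stepA, hcA, PySem.Dict.getD_insert, hkk, hA']

theorem inv_fold (arr : List String) (dA : PySem.Dict String (String × Int))
    (dB : PySem.Dict String (List String)) (h : PVInv dA dB) :
    PVInv (arr.foldl stepA dA) (arr.foldl stepB dB) := by
  induction arr generalizing dA dB with
  | nil => exact h
  | cons x xs ih => exact ih _ _ (inv_step _ _ _ h)

theorem solve_eq (arr : List String) : solve arr = solve_alt arr := by
  have h0 : PVInv PySem.Dict.empty PySem.Dict.empty := by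
    refine ⟨by simp [PySem.Dict.keys_empty], by simp [PySem.Dict.keys_empty], ?_⟩
    intro k hk
    simp [PySem.Dict.keys_empty] at hk
  have h := inv_fold arr _ _ h0
  obtain ⟨hk, hnd, hrel⟩ := h
  show (arr.foldl stepA PySem.Dict.empty).items.map _ =
    (arr.foldl stepB PySem.Dict.empty).items.map _
  rw [PySem.Dict.items_eq_map_keys _ (hk ▸ hnd) ("", 0),
      PySem.Dict.items_eq_map_keys _ hnd [], hk, List.map_map, List.map_map]
  apply List.map_congr_left
  intro k hkmem
  obtain ⟨v, t, hB, hA⟩ := hrel k hkmem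
  simp [hA, hB, PySem.List.max?_id_cons]

-- ===== VERDICT (by name: the statement is the Claim_ definition above) =====
theorem solve_spec : Claim_equal_solve := by
  intro arr _ _
  exact solve_eq arr
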